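-- pv_equiv track=rewrite | github.com/theochem/fanpy | wfns/backend/graphs.py | generate_complete_pmatch
-- ===== SOURCE A (Python) =====
-- def generate_complete_pmatch(indices, sign=1):
--     r"""Generate all of the perfect matches of a complete (sub)graph.
--
--     Generated perfect matches correspond to a pairing scheme in geminal wavefunctions and the
--     signature is needed to find the sign of the Slater determinant after "unpacking" the pairing
--     scheme.
--
--     Parameters
--     ----------
--     indices : list of int
--         List of indices of the vertices used to create the complete graph.
--
--     Yields
--     ------
--     pairing_scheme : tuple of tuple of 2 ints
--         Contains the edges needed to make a perfect match.
--     sign : {1, -1}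
--         Signature of the transpositions required to shuffle the `pairing_scheme` back into the
--         original order in `indices`.
--
--     Notes
--     -----
--     The `sign` gives the signature with respect to the original `indices`. If the `indices` are not
--     ordered, then signatures won't really mean anything.
--
--     """
--     indices = tuple(indices)
--     n = len(indices)
--     if n % 2 == 1 or n < 2:
--         yield tuple(), sign
--     elif n == 2:
--         yield ((indices[0], indices[1]), ), sign
--     else:
--         # smaller subset (all pairs without the last two indices)
--         Sn_2 = generate_complete_pmatch(indices[:-2], sign=sign)
--         for scheme, inner_sign in Sn_2:
--             # add in the last two indices
--             yield scheme + (indices[-2:],), inner_sign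
--             # starting from the last
--             for i in reversed(range(n//2 - 1)):
--                 # replace ith pair in the scheme with last pair
--                 yield (scheme[:i] +
--                        ((scheme[i][0], indices[-2]), (scheme[i][1], indices[-1])) +
--                        scheme[i+1:]), -inner_sign
--                 yield (scheme[:i] +
--                        ((scheme[i][0], indices[-1]), (scheme[i][1], indices[-2])) +
--                        scheme[i+1:]), inner_sign
-- ===== SOURCE B (Python) =====
-- def _extend(scheme, s, a, b):
--     """All ways to add the pair (a, b) to an existing pairing scheme."""
--     out = [(scheme + ((a, b),), s)]
--     for i in range(len(scheme) - 1, -1, -1):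
--         x, y = scheme[i]
--         head, tail = scheme[:i], scheme[i + 1:]
--         out.append((head + ((x, a), (y, b)) + tail, -s))
--         out.append((head + ((x, b), (y, a)) + tail, s))
--     return out
--
--
-- def generate_complete_pmatch(indices, sign=1):
--     """Iterative bottom-up enumeration of all perfect matchings with signs."""
--     idx = tuple(indices)
--     n = len(idx)
--     if n % 2 == 1 or n < 2:
--         yield tuple(), sign
--         return
--     level = [(((idx[0], idx[1]),), sign)]
--     for k in range(1, n // 2):
--         a, b = idx[2 * k], idx[2 * k + 1]
--         level = [ext for scheme, s in level for ext in _extend(scheme, s, a, b)]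
--     yield from level
-- ===== Notes on version B (the rewrite author's own statement) =====
-- stated objective: alternative
-- what changed: Replaces the top-down recursive generator (peeling the last two indices and recursing) by an iterative bottom-up pass that maintains an explicit level of (scheme, sign) pairs and extends it with one index pair at a time.
import Mathlib
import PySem

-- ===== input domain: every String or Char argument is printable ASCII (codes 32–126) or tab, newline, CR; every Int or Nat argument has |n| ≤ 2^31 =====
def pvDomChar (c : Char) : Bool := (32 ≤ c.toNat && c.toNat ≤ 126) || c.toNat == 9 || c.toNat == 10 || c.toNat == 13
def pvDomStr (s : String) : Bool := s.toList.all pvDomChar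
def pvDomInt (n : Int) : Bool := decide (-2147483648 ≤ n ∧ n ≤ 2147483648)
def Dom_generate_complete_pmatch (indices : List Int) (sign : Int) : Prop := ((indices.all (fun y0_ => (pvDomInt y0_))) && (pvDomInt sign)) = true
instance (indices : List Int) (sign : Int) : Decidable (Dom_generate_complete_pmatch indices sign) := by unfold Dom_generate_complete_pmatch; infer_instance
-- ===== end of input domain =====

-- B replaces A's top-down recursion (peel the last two indices, recurse) by an
-- iterative bottom-up fold maintaining an explicit level of (scheme, sign) pairs;
-- same outputs in the same order ("alternative" objective, not claimed faster).
-- Both Pythons are generators; ports return the materialized list of yields.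

-- ===== PORT A =====
-- Literal transliteration of A.  indices[:-2] → PySem.List.slice; indices[-2], indices[-1]
-- → PySem.List.pyGetD (always in range here, so exact); scheme[:i], scheme[i], scheme[i+1:]
-- with i ≥ 0 in range → take / getD / drop (exact for the in-range nonnegative i used).
def generate_complete_pmatch (indices : List Int) (sign : Int) : List ((List (Int × Int)) × Int) :=
  let n := indices.length
  if h1 : n % 2 == 1 || n < 2 then [([], sign)]
  else if h2 : n == 2 then [([(indices.getD 0 0, indices.getD 1 0)], sign)]
  else
    let prev := generate_complete_pmatch (PySem.List.slice indices none (some (-2))) sign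
    prev.flatMap fun si =>
      let scheme := si.1
      let inner := si.2
      (scheme ++ [(PySem.List.pyGetD indices (-2) 0, PySem.List.pyGetD indices (-1) 0)], inner) ::
      (List.range (n / 2 - 1)).reverse.flatMap fun i =>
        let p := scheme.getD i (0, 0)
        [(scheme.take i ++ [(p.1, PySem.List.pyGetD indices (-2) 0), (p.2, PySem.List.pyGetD indices (-1) 0)] ++ scheme.drop (i + 1), -inner),
         (scheme.take i ++ [(p.1, PySem.List.pyGetD indices (-1) 0), (p.2, PySem.List.pyGetD indices (-2) 0)] ++ scheme.drop (i + 1), inner)]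
termination_by indices.length
decreasing_by
  simp only [PySem.List.slice_to_neg_ofNat indices 2 (by omega)]
  simp only [List.length_take]
  simp at h1 h2
  omega

-- ===== PORT B =====
-- _extend from Source B: range(len(scheme)-1, -1, -1) → (List.range scheme.length).reverse.
def pmatchExtend (scheme : List (Int × Int)) (s a b : Int) : List ((List (Int × Int)) × Int) :=
  (scheme ++ [(a, b)], s) ::
  (List.range scheme.length).reverse.flatMap fun i =>
    let p := scheme.getD i (0, 0)
    [(scheme.take i ++ [(p.1, a), (p.2, b)] ++ scheme.drop (i + 1), -s),
     (scheme.take i ++ [(p.1, b), (p.2, a)] ++ scheme.drop (i + 1), s)]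

def generate_complete_pmatch_alt (indices : List Int) (sign : Int) : List ((List (Int × Int)) × Int) :=
  let n := indices.length
  if n % 2 == 1 || n < 2 then [([], sign)]
  else
    (List.range' 1 (n / 2 - 1)).foldl
      (fun level k =>
        let a := indices.getD (2 * k) 0
        let b := indices.getD (2 * k + 1) 0
        level.flatMap fun si => pmatchExtend si.1 si.2 a b)
      [([(indices.getD 0 0, indices.getD 1 0)], sign)]

-- ===== PRECONDITION & SPEC =====
def Spec_generate_complete_pmatch (indices : List Int) (sign : Int) (out : List ((List (Int × Int)) × Int)) : Prop := out = generate_complete_pmatch_alt indices sign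
instance (indices : List Int) (sign : Int) (out : List ((List (Int × Int)) × Int)) : Decidable (Spec_generate_complete_pmatch indices sign out) := by unfold Spec_generate_complete_pmatch; infer_instance

-- ===== CLAIM (what is proved, stated in full; the proofs are below) =====
def Claim_equal_generate_complete_pmatch : Prop := ∀ (indices : List Int) (sign : Int), Dom_generate_complete_pmatch indices sign → Spec_generate_complete_pmatch indices sign (generate_complete_pmatch indices sign)

-- ===== LEMMAS AND PROOFS =====

lemma pmatch_scheme_length (indices : List Int) (sign : Int)
    (heven : indices.length % 2 = 0) (hlen : 2 ≤ indices.length) :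
    ∀ si ∈ generate_complete_pmatch indices sign, si.1.length = indices.length / 2 := by
  fun_induction generate_complete_pmatch indices sign with
  | case1 ind s h =>
      simp at h
      omega
  | case2 ind s h h2 =>
      simp at h2
      intro si hsi
      simp at hsi
      subst hsi
      simp
      omega
  | case3 ind s h h2 prev ih =>
      simp only [Bool.or_eq_true, beq_iff_eq, decide_eq_true_eq, not_or] at h h2
      have hslice : PySem.List.slice ind none (some (-2)) = ind.take (ind.length - 2) := by
        rw [PySem.List.slice_to_neg_ofNat ind 2 (by omega)]
      have hsl : (PySem.List.slice ind none (some (-2))).length = ind.length - 2 := by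
        rw [hslice]; simp
      intro si hsi
      have ih' := ih (by omega) (by omega)
      rw [List.mem_flatMap] at hsi
      obtain ⟨t, ht, hmem⟩ := hsi
      have hlt : t.1.length = (ind.length - 2) / 2 := by
        have := ih' t ht; omega
      rcases List.mem_cons.mp hmem with hh | hh
      · subst hh; simp; omega
      · rw [List.mem_flatMap] at hh
        obtain ⟨i, hi, hm2⟩ := hh
        rw [List.mem_reverse, List.mem_range] at hi
        have hile : i < t.1.length := by omega
        simp only [List.mem_cons, List.mem_singleton, List.not_mem_nil, or_false] at hm2
        rcases hm2 with hh | hh <;> subst hh <;> simp <;> omega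

lemma flatMap_congr_mem {α β : Type} (l : List α) (f g : α → List β)
    (h : ∀ a ∈ l, f a = g a) : l.flatMap f = l.flatMap g := by
  induction l with
  | nil => rfl
  | cons x xs ih =>
    simp only [List.flatMap_cons]
    rw [h x (by simp), ih (fun a ha => h a (by simp [ha]))]

lemma pmatch_fold (m : Nat) : ∀ (indices : List Int) (sign : Int), indices.length = 2 * m → 1 ≤ m →
    generate_complete_pmatch indices sign =
      (List.range' 1 (m - 1)).foldl
        (fun level k =>
          let a := indices.getD (2 * k) 0
          let b := indices.getD (2 * k + 1) 0
          level.flatMap fun si => pmatchExtend si.1 si.2 a b)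
        [([(indices.getD 0 0, indices.getD 1 0)], sign)] := by
  induction m with
  | zero => intro _ _ _ h; omega
  | succ m ih =>
    intro indices sign hlen _
    rw [generate_complete_pmatch]
    by_cases hm : m = 0
    · subst hm
      simp [hlen]
    · have h4 : 4 ≤ indices.length := by omega
      rw [dif_neg (by simp; omega), dif_neg (by simp; omega)]
-- abbreviations for the two new vertices
      have ha : PySem.List.pyGetD indices (-2) 0 = indices.getD (2 * m) 0 := by
        rw [PySem.List.pyGetD_neg_ofNat indices 2 0 (by omega) (by omega)]
        rw [List.getD_eq_getElem _ _ (by omega)]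
        congr 1
        omega
      have hb : PySem.List.pyGetD indices (-1) 0 = indices.getD (2 * m + 1) 0 := by
        rw [PySem.List.pyGetD_neg_ofNat indices 1 0 (by omega) (by omega)]
        rw [List.getD_eq_getElem _ _ (by omega)]
        congr 1
        omega
      have hslice : PySem.List.slice indices none (some (-2)) = indices.take (2 * m) := by
        rw [PySem.List.slice_to_neg_ofNat indices 2 (by omega)]
        congr 1
        omega
      have hsl : (indices.take (2 * m)).length = 2 * m := by simp; omega
      -- step 1: rewrite the per-scheme extension to pmatchExtend
      have hcong : (generate_complete_pmatch (PySem.List.slice indices none (some (-2))) sign).flatMap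
            (fun si =>
              (si.1 ++ [(PySem.List.pyGetD indices (-2) 0, PySem.List.pyGetD indices (-1) 0)], si.2) ::
              (List.range (indices.length / 2 - 1)).reverse.flatMap fun i =>
                let p := si.1.getD i (0, 0)
                [(si.1.take i ++ [(p.1, PySem.List.pyGetD indices (-2) 0), (p.2, PySem.List.pyGetD indices (-1) 0)] ++ si.1.drop (i + 1), -si.2),
                 (si.1.take i ++ [(p.1, PySem.List.pyGetD indices (-1) 0), (p.2, PySem.List.pyGetD indices (-2) 0)] ++ si.1.drop (i + 1), si.2)]) =
          (generate_complete_pmatch (PySem.List.slice indices none (some (-2))) sign).flatMap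
            (fun si => pmatchExtend si.1 si.2 (indices.getD (2 * m) 0) (indices.getD (2 * m + 1) 0)) := by
        apply flatMap_congr_mem
        intro t ht
        have hlt : t.1.length = m := by
          have := pmatch_scheme_length (PySem.List.slice indices none (some (-2))) sign
            (by rw [hslice]; omega) (by rw [hslice]; omega) t ht
          rw [hslice, hsl] at this
          omega
        have hr : indices.length / 2 - 1 = t.1.length := by omega
        rw [pmatchExtend, ha, hb, hr]
      refine hcong.trans ?_
      rw [hslice, ih (indices.take (2 * m)) sign hsl (by omega)]
      have hgetD : ∀ j, j < 2 * m → (indices.take (2 * m)).getD j 0 = indices.getD j 0 := by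
        intro j hj
        simp [List.getD, List.getElem?_take, hj]
      rw [hgetD 0 (by omega), hgetD 1 (by omega)]
      have hsteps : (List.range' 1 (m - 1)).foldl
          (fun level k =>
            let a := (indices.take (2 * m)).getD (2 * k) 0
            let b := (indices.take (2 * m)).getD (2 * k + 1) 0
            level.flatMap fun si => pmatchExtend si.1 si.2 a b)
          [([(indices.getD 0 0, indices.getD 1 0)], sign)] =
        (List.range' 1 (m - 1)).foldl
          (fun level k =>
            let a := indices.getD (2 * k) 0
            let b := indices.getD (2 * k + 1) 0
            level.flatMap fun si => pmatchExtend si.1 si.2 a b)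
          [([(indices.getD 0 0, indices.getD 1 0)], sign)] := by
        apply PySem.List.foldl_congr_mem
        intro acc k hk
        rw [List.mem_range'_1] at hk
        rw [hgetD (2 * k) (by omega), hgetD (2 * k + 1) (by omega)]
      rw [hsteps]
      have hrange : List.range' 1 (m + 1 - 1) = List.range' 1 (m - 1) ++ [m] := by
        have h : m - 1 + 1 = m := by omega
        rw [Nat.add_sub_cancel, ← h, List.range'_concat]
        congr 1
        simp
        omega
      rw [hrange, List.foldl_append]
      simp only [List.foldl_cons, List.foldl_nil]

-- ===== VERDICT (by name: the statement is the Claim_ definition above) =====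
theorem generate_complete_pmatch_spec : Claim_equal_generate_complete_pmatch := by
  intro indices sign _
  unfold Spec_generate_complete_pmatch generate_complete_pmatch_alt
  by_cases h : (indices.length % 2 == 1 || decide (indices.length < 2)) = true
  · rw [if_pos h, generate_complete_pmatch, dif_pos h]
  · rw [if_neg h]
    simp only [Bool.or_eq_true, beq_iff_eq, decide_eq_true_eq, not_or] at h
    exact pmatch_fold (indices.length / 2) indices sign (by omega) (by omega)
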